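-- pv_equiv track=rewrite | github.com/mkern75/EverybodyCodes | TheSongOfDucksAndDragons2025/q13.py | turn_wheel
-- ===== SOURCE A (Python) =====
-- def turn_wheel(turns, wheel):
--     cnt = sum(max(a, b) - min(a, b) + 1 for a, b in wheel)
--     turns %= cnt
--     i = 0
--     while True:
--         a, b = wheel[i]
--         if a <= b:
--             c = b - a + 1
--             if turns < c:
--                 return a + turns
--             turns -= c
--         else:
--             c = a - b + 1
--             if turns < c:
--                 return a - turns
--             turns -= c
--         i += 1
-- ===== SOURCE B (Python) =====
-- def turn_wheel(turns, wheel):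
--     # Prefix-sum table of segment lengths + binary-search lookup (instead of a running-subtraction scan).
--     prefix = []
--     total = 0
--     for a, b in wheel:
--         total += abs(a - b) + 1
--         prefix.append(total)
--     t = turns % total
--     lo = 0
--     hi = len(prefix)
--     while lo < hi:
--         mid = (lo + hi) // 2
--         if prefix[mid] <= t:
--             lo = mid + 1
--         else:
--             hi = mid
--     base = prefix[lo - 1] if lo > 0 else 0
--     a, b = wheel[lo]
--     off = t - base
--     return a + off if a <= b else a - off
-- ===== Notes on version B (the rewrite author's own statement) =====
-- stated objective: alternative
-- what changed: Replaces A's running-subtraction linear scan over the segments with a precomputed prefix-sum table of segment lengths plus a hand-written binary search (bisect_right) that locates the containing segment and derives the offset from the table.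
import Mathlib
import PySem

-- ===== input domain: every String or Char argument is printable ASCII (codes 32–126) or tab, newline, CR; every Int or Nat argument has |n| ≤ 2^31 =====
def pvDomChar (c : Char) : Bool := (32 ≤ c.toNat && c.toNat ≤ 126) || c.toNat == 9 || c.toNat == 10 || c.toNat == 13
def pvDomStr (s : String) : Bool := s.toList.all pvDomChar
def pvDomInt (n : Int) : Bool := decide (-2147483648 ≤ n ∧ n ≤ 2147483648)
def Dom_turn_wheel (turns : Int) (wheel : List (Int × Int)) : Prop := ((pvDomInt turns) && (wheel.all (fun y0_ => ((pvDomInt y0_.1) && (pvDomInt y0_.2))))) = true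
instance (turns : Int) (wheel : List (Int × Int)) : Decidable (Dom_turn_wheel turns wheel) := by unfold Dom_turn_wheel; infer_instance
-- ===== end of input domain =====

-- B replaces A's linear running-subtraction scan by a prefix-sum table plus binary search (alternative decomposition, same cost class).

-- ===== PORT A =====
-- while True loop of A, peeling wheel[i] for i = 0,1,2,…; [] is unreachable on Pre_ (Python would raise IndexError)
def turnLoopA : Int → List (Int × Int) → Int
  | _, [] => 0
  | t, (a, b) :: rest =>
    if a ≤ b then
      if t < b - a + 1 then a + t else turnLoopA (t - (b - a + 1)) rest
    else
      if t < a - b + 1 then a - t else turnLoopA (t - (a - b + 1)) rest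

def turn_wheel (turns : Int) (wheel : List (Int × Int)) : Int :=
  let cnt := (wheel.map (fun p => max p.1 p.2 - min p.1 p.2 + 1)).sum
  turnLoopA (PySem.Int.mod turns cnt) wheel

-- ===== PORT B =====
-- the for-loop of Source B building (total, prefix)
def buildPrefixB (wheel : List (Int × Int)) : Int × List Int :=
  wheel.foldl (fun st p => (st.1 + |p.1 - p.2| + 1, st.2 ++ [st.1 + |p.1 - p.2| + 1])) (0, [])

-- the hand-written while-loop binary search of Source B; prefix[mid] is in range whenever lo < hi ≤ len,
-- so getD is exact there; the fuel argument (length of the list, ≥ hi - lo) is only a structural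
-- totality guard for the while-loop and is never exhausted
def bsearchB (P : List Int) (t : Int) : Nat → Nat → Nat → Nat
  | 0, lo, _ => lo
  | fuel + 1, lo, hi =>
    if lo < hi then
      let mid := (lo + hi) / 2
      if P.getD mid 0 ≤ t then bsearchB P t fuel (mid + 1) hi else bsearchB P t fuel lo mid
    else lo

def turn_wheel_alt (turns : Int) (wheel : List (Int × Int)) : Int :=
  let tp := buildPrefixB wheel
  let total := tp.1
  let pref := tp.2
  let t := PySem.Int.mod turns total
  let lo := bsearchB pref t pref.length 0 pref.length
  let base := if lo > 0 then pref.getD (lo - 1) 0 else 0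
  let p := wheel.getD lo (0, 0)
  let off := t - base
  if p.1 ≤ p.2 then p.1 + off else p.1 - off

-- ===== PRECONDITION & SPEC =====
-- Pre_ excludes only the empty wheel, on which A (and B) raise ZeroDivisionError at 'turns %= cnt'.
def Pre_turn_wheel (turns : Int) (wheel : List (Int × Int)) : Prop := wheel ≠ []
instance (turns : Int) (wheel : List (Int × Int)) : Decidable (Pre_turn_wheel turns wheel) := by unfold Pre_turn_wheel; infer_instance
def pvWitness_turn_wheel : Int × (List (Int × Int)) := (7, [(1, 3), (5, 2)])

def Spec_turn_wheel (turns : Int) (wheel : List (Int × Int)) (out : Int) : Prop := out = turn_wheel_alt turns wheel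
instance (turns : Int) (wheel : List (Int × Int)) (out : Int) : Decidable (Spec_turn_wheel turns wheel out) := by unfold Spec_turn_wheel; infer_instance

-- ===== CLAIM (what is proved, stated in full; the proofs are below) =====
def Claim_equal_turn_wheel : Prop := ∀ (turns : Int) (wheel : List (Int × Int)), Dom_turn_wheel turns wheel → Pre_turn_wheel turns wheel → Spec_turn_wheel turns wheel (turn_wheel turns wheel)

-- ===== LEMMAS AND PROOFS =====

-- segment length, and reference prefix-sum list
def segC (p : Int × Int) : Int := |p.1 - p.2| + 1
def segS (w : List (Int × Int)) : Int := (w.map segC).sum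
def pfx : List (Int × Int) → Int → List Int
  | [], _ => []
  | p :: rest, acc => (acc + segC p) :: pfx rest (acc + segC p)

lemma segC_eq_minmax (p : Int × Int) : max p.1 p.2 - min p.1 p.2 + 1 = segC p := by
  unfold segC
  rcases le_total p.1 p.2 with h | h
  · rw [max_eq_right h, min_eq_left h, abs_of_nonpos (by omega)]; ring
  · rw [max_eq_left h, min_eq_right h, abs_of_nonneg (by omega)]

lemma one_le_segC (p : Int × Int) : 1 ≤ segC p := by
  unfold segC; have := abs_nonneg (p.1 - p.2); omega

lemma length_le_segS (w : List (Int × Int)) : (w.length : Int) ≤ segS w := by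
  induction w with
  | nil => simp [segS]
  | cons p rest ih =>
    have := one_le_segC p
    simp only [segS, List.map_cons, List.sum_cons, List.length_cons] at *
    push_cast; omega

lemma buildPrefixB_eq (w : List (Int × Int)) :
    ∀ s acc, w.foldl (fun st p => (st.1 + |p.1 - p.2| + 1, st.2 ++ [st.1 + |p.1 - p.2| + 1])) (s, acc)
      = (s + segS w, acc ++ pfx w s) := by
  induction w with
  | nil => intro s acc; simp [segS, pfx]
  | cons p rest ih =>
    intro s acc
    simp only [List.foldl_cons, pfx, segS, List.map_cons, List.sum_cons]
    rw [ih]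
    have hc : s + segC p = s + |p.1 - p.2| + 1 := by simp only [segC]; ring
    rw [Prod.mk.injEq]
    refine ⟨?_, ?_⟩
    · rw [← hc, segS]; ring
    · rw [← hc]; simp

lemma length_pfx (w : List (Int × Int)) : ∀ s, (pfx w s).length = w.length := by
  induction w with
  | nil => intro s; simp [pfx]
  | cons p rest ih => intro s; simp [pfx, ih]

lemma pfx_shift (w : List (Int × Int)) : ∀ s, pfx w s = (pfx w 0).map (fun x => s + x) := by
  induction w with
  | nil => intro s; simp [pfx]
  | cons p rest ih =>
    intro s
    simp only [pfx, zero_add]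
    rw [ih (s + segC p), ih (segC p), List.map_cons, List.map_map]
    congr 1
    exact List.map_congr_left (fun x _ => by simp only [Function.comp_apply]; ring)

lemma pfx_getD (w : List (Int × Int)) : ∀ j s, j < w.length → (pfx w s).getD j 0 = s + segS (w.take (j + 1)) := by
  induction w with
  | nil => intro j s h; simp at h
  | cons p rest ih =>
    intro j s h
    cases j with
    | zero => simp [pfx, segS]
    | succ j' =>
      simp only [pfx, List.getD_cons_succ]
      rw [ih j' _ (by simpa using h)]
      simp [segS]; ring

lemma segS_nonneg (w : List (Int × Int)) : 0 ≤ segS w := by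
  have h := length_le_segS w
  have : (0 : Int) ≤ (w.length : Int) := by positivity
  omega

lemma pfx_mono (w : List (Int × Int)) (i j : Nat) (hij : i ≤ j) (hj : j < w.length) :
    (pfx w 0).getD i 0 ≤ (pfx w 0).getD j 0 := by
  rw [pfx_getD w i 0 (lt_of_le_of_lt hij hj), pfx_getD w j 0 hj]
  have htake : w.take (j + 1) = w.take (i + 1) ++ (w.drop (i + 1)).take (j - i) := by
    rw [← List.take_add]; congr 1; omega
  rw [htake]
  have : 0 ≤ segS ((w.drop (i + 1)).take (j - i)) := segS_nonneg _
  simp only [segS, List.map_append, List.sum_append] at *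
  omega

lemma pfx_last (w : List (Int × Int)) (h : w ≠ []) :
    (pfx w 0).getD (w.length - 1) 0 = segS w := by
  have hl : w.length - 1 < w.length := by
    cases w with | nil => simp at h | cons a l => simp
  rw [pfx_getD w _ 0 hl]
  have : w.length - 1 + 1 = w.length := by
    cases w with | nil => simp at h | cons a l => simp
  rw [this, List.take_length]; ring

-- binary-search invariant: the result r separates P into (≤ t) below and (> t) from r on
lemma bsearchB_inv (P : List Int) (t : Int)
    (hmono : ∀ i j, i ≤ j → j < P.length → P.getD i 0 ≤ P.getD j 0) :
    ∀ fuel lo hi, hi - lo ≤ fuel → lo ≤ hi → hi ≤ P.length →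
      (∀ j, j < lo → P.getD j 0 ≤ t) → (∀ j, hi ≤ j → j < P.length → t < P.getD j 0) →
      (∀ j, j < bsearchB P t fuel lo hi → P.getD j 0 ≤ t) ∧
      (∀ j, bsearchB P t fuel lo hi ≤ j → j < P.length → t < P.getD j 0) := by
  intro fuel
  induction fuel with
  | zero =>
    intro lo hi hf hle hhi hlow hhigh
    have : lo = hi := by omega
    subst this
    exact ⟨fun j hj => hlow j hj, fun j hj hjl => hhigh j hj hjl⟩
  | succ n ih =>
    intro lo hi hf hle hhi hlow hhigh
    rw [bsearchB]
    by_cases h : lo < hi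
    · simp only [if_pos h]
      have hmidlt : (lo + hi) / 2 < hi := by omega
      have hmidge : lo ≤ (lo + hi) / 2 := by omega
      by_cases hc : P.getD ((lo + hi) / 2) 0 ≤ t
      · simp only [if_pos hc]
        exact ih _ _ (by omega) (by omega) hhi
          (fun j hj => le_trans (hmono j ((lo + hi) / 2) (by omega) (by omega)) hc) hhigh
      · simp only [if_neg hc]
        exact ih _ _ (by omega) (by omega) (by omega) hlow
          (fun j hj hjl => lt_of_lt_of_le (lt_of_not_ge hc) (hmono _ j hj hjl))
    · simp only [if_neg h]
      exact ⟨hlow, fun j hj hjl => hhigh j (by omega) hjl⟩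

-- the linear scan equals the table lookup at any index r with P[<r] ≤ t < P[r]
lemma scan_eq_lookup (w : List (Int × Int)) :
    ∀ (t : Int) (r : Nat), 0 ≤ t → r < w.length →
      (∀ j, j < r → (pfx w 0).getD j 0 ≤ t) → t < (pfx w 0).getD r 0 →
      turnLoopA t w =
        (let base := if r > 0 then (pfx w 0).getD (r - 1) 0 else 0
         let p := w.getD r (0, 0)
         if p.1 ≤ p.2 then p.1 + (t - base) else p.1 - (t - base)) := by
  induction w with
  | nil => intro t r _ hr; simp at hr
  | cons p rest ih =>
    intro t r ht hr hbelow habove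
    have hpfx0 : (pfx (p :: rest) 0).getD 0 0 = segC p := by simp [pfx]
    cases r with
    | zero =>
      rw [hpfx0] at habove
      simp only [turnLoopA, List.getD_cons_zero]
      by_cases hab : p.1 ≤ p.2
      · have habs : |p.1 - p.2| = p.2 - p.1 := by rw [abs_of_nonpos (by omega)]; ring
        rw [segC] at habove; rw [habs] at habove
        simp [hab, show t < p.2 - p.1 + 1 by omega]
      · have habs : |p.1 - p.2| = p.1 - p.2 := abs_of_nonneg (by omega)
        rw [segC] at habove; rw [habs] at habove
        simp [hab, show t < p.1 - p.2 + 1 by omega]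
    | succ r' =>
      have h0 : segC p ≤ t := by rw [← hpfx0]; exact hbelow 0 (Nat.succ_pos r')
      have hstep : turnLoopA t (p :: rest) = turnLoopA (t - segC p) rest := by
        simp only [turnLoopA]
        by_cases hab : p.1 ≤ p.2
        · have habs : |p.1 - p.2| = p.2 - p.1 := by rw [abs_of_nonpos (by omega)]; ring
          rw [segC] at h0; rw [habs] at h0
          simp [hab, show ¬ t < p.2 - p.1 + 1 by omega, segC, habs]
        · have habs : |p.1 - p.2| = p.1 - p.2 := abs_of_nonneg (by omega)
          rw [segC] at h0; rw [habs] at h0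
          simp [hab, show ¬ t < p.1 - p.2 + 1 by omega, segC, habs]
      have hcons : pfx (p :: rest) 0 = segC p :: (pfx rest 0).map (fun x => segC p + x) := by
        simp [pfx, pfx_shift rest (segC p)]
      have hgetD : ∀ j, j < rest.length → (pfx (p :: rest) 0).getD (j + 1) 0 = segC p + (pfx rest 0).getD j 0 := by
        intro j hj
        rw [hcons]
        simp only [List.getD_cons_succ]
        rw [List.getD_eq_getElem?_getD, List.getD_eq_getElem?_getD, List.getElem?_map]
        have : j < (pfx rest 0).length := by rwa [length_pfx]
        simp [List.getElem?_eq_getElem this]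
      have hr' : r' < rest.length := by simpa using hr
      rw [hstep, ih (t - segC p) r' (by omega) hr'
        (fun j hj => by have := hbelow (j + 1) (by omega); rw [hgetD j (by omega)] at this; omega)
        (by have := habove; rw [hgetD r' hr'] at this; omega)]
      have hbase : (pfx (p :: rest) 0).getD r' 0
          = segC p + (if r' > 0 then (pfx rest 0).getD (r' - 1) 0 else 0) := by
        cases r' with
        | zero => simpa using hpfx0
        | succ k =>
          rw [hgetD k (by omega)]
          simp
      simp only [List.getD_cons_succ, Nat.add_sub_cancel]
      rw [if_pos (Nat.succ_pos r'), hbase]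
      split_ifs <;> ring

-- ===== VERDICT (by name: the statement is the Claim_ definition above) =====
theorem turn_wheel_spec : Claim_equal_turn_wheel := by
  intro turns wheel _ hpre
  unfold Spec_turn_wheel turn_wheel turn_wheel_alt buildPrefixB
  have hcnt : (wheel.map (fun p => max p.1 p.2 - min p.1 p.2 + 1)).sum = segS wheel := by
    unfold segS; exact List.map_congr_left (fun p _ => segC_eq_minmax p) ▸ rfl
  simp only
  rw [hcnt, buildPrefixB_eq wheel 0 []]
  simp only [zero_add, List.nil_append]
  have hlen : (pfx wheel 0).length = wheel.length := length_pfx wheel 0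
  have hwlen : 0 < wheel.length := List.length_pos_iff.mpr hpre
  have hSpos : 0 < segS wheel := by
    have h1 := length_le_segS wheel
    have h2 : (1 : Int) ≤ (wheel.length : Int) := by exact_mod_cast hwlen
    omega
  set t := PySem.Int.mod turns (segS wheel) with ht
  have ht0 : 0 ≤ t := PySem.Int.mod_nonneg _ hSpos
  have htS : t < segS wheel := PySem.Int.mod_lt _ hSpos
  have hmono : ∀ i j, i ≤ j → j < (pfx wheel 0).length → (pfx wheel 0).getD i 0 ≤ (pfx wheel 0).getD j 0 := by
    intro i j hij hj; exact pfx_mono wheel i j hij (by omega)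
  obtain ⟨hC1, hC2⟩ := bsearchB_inv (pfx wheel 0) t hmono (pfx wheel 0).length 0 (pfx wheel 0).length
    (by omega) (Nat.zero_le _) le_rfl (by omega) (by omega)
  set r := bsearchB (pfx wheel 0) t (pfx wheel 0).length 0 (pfx wheel 0).length with hrdef
  have hrlt : r < wheel.length := by
    by_contra hge
    have := hC1 (wheel.length - 1) (by omega)
    rw [pfx_last wheel hpre] at this
    omega
  have hmain := scan_eq_lookup wheel t r ht0 hrlt (fun j hj => hC1 j hj)
    (hC2 r le_rfl (by omega))
  rw [hmain]

-- crash note: on wheel = [] both A and B raise ZeroDivisionError, excluded by Pre_.
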